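-- pv_equiv track=rewrite | github.com/tgerez/Advent-of-code | 2015/day_15/day_15_part_1.py | score_calculation
-- ===== SOURCE A (Python) =====
-- def score_calculation(ingredients, proportion):  # ingredients est une liste de dicos et proportion un tuple
--     capacity = 0
--     durability = 0
--     flavor = 0
--     texture = 0
--     j = 0 # permet d'accéder à la proportion de cette ingredient dans le tuple
--     for i in ingredients:
--         capacity += (proportion[j] * i['capacity'])
--         durability += (proportion[j] * i['durability'])
--         flavor += (proportion[j] * i['flavor'])
--         texture += (proportion[j] * i['texture'])
--         j += 1
--
--     if capacity < 0 or durability < 0 or flavor < 0 or texture < 0: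
--         score = 0
--     else:
--         score = capacity * durability * flavor * texture
--
--     return score
-- ===== SOURCE B (Python) =====
-- def score_calculation(ingredients, proportion):
--     names = ['capacity', 'durability', 'flavor', 'texture']
--     totals = [sum(proportion[j] * ing[name] for j, ing in enumerate(ingredients))
--               for name in names]
--     if any(t < 0 for t in totals):
--         return 0
--     capacity, durability, flavor, texture = totals
--     return capacity * durability * flavor * texture
-- ===== Notes on version B (the rewrite author's own statement) =====
-- stated objective: alternative
-- what changed: Transposes the loop nesting: instead of one pass over ingredients maintaining four named accumulators and a manual index counter, B makes one independent reduction per property name (outer loop over the four names, inner enumerate over ingredients), collects the four totals in a list, and uses any() for the negativity test.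
import Mathlib
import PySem

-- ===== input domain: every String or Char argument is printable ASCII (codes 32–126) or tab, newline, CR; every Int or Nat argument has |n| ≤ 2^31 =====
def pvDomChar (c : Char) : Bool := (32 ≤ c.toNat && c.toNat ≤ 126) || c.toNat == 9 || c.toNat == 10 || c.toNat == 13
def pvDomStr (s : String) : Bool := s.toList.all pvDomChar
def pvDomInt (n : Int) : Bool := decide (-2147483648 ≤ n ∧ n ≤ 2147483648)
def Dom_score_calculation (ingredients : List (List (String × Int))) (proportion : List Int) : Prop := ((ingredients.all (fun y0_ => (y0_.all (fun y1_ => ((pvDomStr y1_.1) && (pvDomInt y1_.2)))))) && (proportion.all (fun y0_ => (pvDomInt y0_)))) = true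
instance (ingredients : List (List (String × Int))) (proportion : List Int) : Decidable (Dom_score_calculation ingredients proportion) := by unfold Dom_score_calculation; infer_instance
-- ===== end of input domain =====

-- B transposes A's single four-accumulator pass into four independent per-property reductions; objective: alternative decomposition (same cost).

-- ===== PORT A =====
-- A's single pass: four accumulators plus a manual index counter j.
-- i['name'] / proportion[j] raise on missing key / short tuple; Pre_ excludes that,
-- so the `.getD 0` defaults are never reached inside Pre_.
def score_calculation (ingredients : List (List (String × Int))) (proportion : List Int) : Int :=
  let s := ingredients.foldl
    (fun (s : (Int × Int × Int × Int) × Int) i =>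
      let j := s.2
      let p := (PySem.List.pyGet? proportion j).getD 0
      ((s.1.1 + p * (i.lookup "capacity").getD 0,
        s.1.2.1 + p * (i.lookup "durability").getD 0,
        s.1.2.2.1 + p * (i.lookup "flavor").getD 0,
        s.1.2.2.2 + p * (i.lookup "texture").getD 0), j + 1))
    ((0, 0, 0, 0), 0)
  if s.1.1 < 0 || s.1.2.1 < 0 || s.1.2.2.1 < 0 || s.1.2.2.2 < 0 then 0
  else s.1.1 * s.1.2.1 * s.1.2.2.1 * s.1.2.2.2

-- ===== PORT B =====
-- sum(proportion[j] * ing[name] for j, ing in enumerate(ingredients))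
def pvAltTotal (ingredients : List (List (String × Int))) (proportion : List Int) (name : String) : Int :=
  (PySem.List.enumerate ingredients).foldl
    (fun acc ji => acc + (PySem.List.pyGet? proportion ji.1).getD 0 * (ji.2.lookup name).getD 0) 0

def score_calculation_alt (ingredients : List (List (String × Int))) (proportion : List Int) : Int :=
  let totals := ["capacity", "durability", "flavor", "texture"].map (pvAltTotal ingredients proportion)
  if totals.any (fun t => t < 0) then 0
  else match totals with
    | [c, d, f, t] => c * d * f * t  -- the `c, d, f, t = totals` unpacking
    | _ => 0                          -- unreachable: totals always has 4 elements

-- ===== PRECONDITION & SPEC =====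
-- Pre_ = exactly where Python A returns: proportion long enough (no IndexError)
-- and every ingredient dict has all four property keys (no KeyError).
def Pre_score_calculation (ingredients : List (List (String × Int))) (proportion : List Int) : Prop :=
  ingredients.length ≤ proportion.length ∧
  ∀ i ∈ ingredients, (i.lookup "capacity").isSome ∧ (i.lookup "durability").isSome ∧
    (i.lookup "flavor").isSome ∧ (i.lookup "texture").isSome
instance (ingredients : List (List (String × Int))) (proportion : List Int) : Decidable (Pre_score_calculation ingredients proportion) := by unfold Pre_score_calculation; infer_instance

def pvWitness_score_calculation : (List (List (String × Int))) × List Int :=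
  ([[("capacity", 2), ("durability", 1), ("flavor", 1), ("texture", 3)]], [5])

def Spec_score_calculation (ingredients : List (List (String × Int))) (proportion : List Int) (out : Int) : Prop := out = score_calculation_alt ingredients proportion
instance (ingredients : List (List (String × Int))) (proportion : List Int) (out : Int) : Decidable (Spec_score_calculation ingredients proportion out) := by unfold Spec_score_calculation; infer_instance

-- ===== CLAIM (what is proved, stated in full; the proofs are below) =====
def Claim_equal_score_calculation : Prop := ∀ (ingredients : List (List (String × Int))) (proportion : List Int), Dom_score_calculation ingredients proportion → Pre_score_calculation ingredients proportion → Spec_score_calculation ingredients proportion (score_calculation ingredients proportion)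

-- ===== LEMMAS AND PROOFS =====

-- Reference per-property sum, recursing over the ingredient list with index j.
def pvT (proportion : List Int) (name : String) : List (List (String × Int)) → Int → Int
  | [], _ => 0
  | i :: rest, j =>
    (PySem.List.pyGet? proportion j).getD 0 * (i.lookup name).getD 0 + pvT proportion name rest (j + 1)

theorem pvFoldA (proportion : List Int) :
    ∀ (l : List (List (String × Int))) (c d f t j : Int),
      l.foldl
        (fun (s : (Int × Int × Int × Int) × Int) i =>
          let j := s.2
          let p := (PySem.List.pyGet? proportion j).getD 0
          ((s.1.1 + p * (i.lookup "capacity").getD 0,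
            s.1.2.1 + p * (i.lookup "durability").getD 0,
            s.1.2.2.1 + p * (i.lookup "flavor").getD 0,
            s.1.2.2.2 + p * (i.lookup "texture").getD 0), j + 1)) ((c, d, f, t), j)
      = ((c + pvT proportion "capacity" l j, d + pvT proportion "durability" l j,
          f + pvT proportion "flavor" l j, t + pvT proportion "texture" l j), j + l.length) := by
  intro l
  induction l with
  | nil => intro c d f t j; simp [pvT]
  | cons i rest ih =>
    intro c d f t j
    simp only [List.foldl_cons, ih, pvT, List.length_cons]
    simp only [Prod.mk.injEq]
    refine ⟨⟨?_, ?_, ?_, ?_⟩, ?_⟩ <;> (push_cast; ring)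

theorem pvFoldB (proportion : List Int) (name : String) :
    ∀ (l : List (List (String × Int))) (acc s : Int),
      (PySem.List.enumerate l s).foldl
        (fun acc ji => acc + (PySem.List.pyGet? proportion ji.1).getD 0 * (ji.2.lookup name).getD 0) acc
      = acc + pvT proportion name l s := by
  intro l
  induction l with
  | nil => intro acc s; simp [PySem.List.enumerate_nil, pvT]
  | cons i rest ih =>
    intro acc s
    rw [PySem.List.enumerate_cons, List.foldl_cons, ih, pvT]
    ring

-- ===== VERDICT (by name: the statement is the Claim_ definition above) =====
theorem score_calculation_spec : Claim_equal_score_calculation := by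
  intro ingredients proportion _ _
  unfold Spec_score_calculation score_calculation score_calculation_alt pvAltTotal
  rw [pvFoldA proportion ingredients 0 0 0 0 0]
  simp only [List.map_cons, List.map_nil]
  rw [pvFoldB proportion "capacity" ingredients 0 0,
      pvFoldB proportion "durability" ingredients 0 0,
      pvFoldB proportion "flavor" ingredients 0 0,
      pvFoldB proportion "texture" ingredients 0 0]
  simp [List.any, or_assoc]
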